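-- pv_equiv track=rewrite | github.com/BeholdMyGlory/statmet-project | mcmc.py | sigma_hash
-- ===== SOURCE A (Python) =====
-- def sigma_hash(sigma):
--     d = 0;
--     hash_value = 0;
--     for i in sigma:
--         if i==2:
--             hash_value += pow(2, d);
--         d += 1;
--
--     return hash_value;
-- ===== SOURCE B (Python) =====
-- def sigma_hash(sigma):
--     bits = ''.join('1' if i == 2 else '0' for i in sigma)
--     return int(bits[::-1], 2) if bits else 0
-- ===== Notes on version B (the rewrite author's own statement) =====
-- stated objective: alternative
-- what changed: B builds the whole bit pattern as a text string of '0'/'1' in one pass and converts it with a single int(s, 2) call, instead of A's loop that recomputes pow(2, d) and adds a fresh big integer at every matching position.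
import Mathlib
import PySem

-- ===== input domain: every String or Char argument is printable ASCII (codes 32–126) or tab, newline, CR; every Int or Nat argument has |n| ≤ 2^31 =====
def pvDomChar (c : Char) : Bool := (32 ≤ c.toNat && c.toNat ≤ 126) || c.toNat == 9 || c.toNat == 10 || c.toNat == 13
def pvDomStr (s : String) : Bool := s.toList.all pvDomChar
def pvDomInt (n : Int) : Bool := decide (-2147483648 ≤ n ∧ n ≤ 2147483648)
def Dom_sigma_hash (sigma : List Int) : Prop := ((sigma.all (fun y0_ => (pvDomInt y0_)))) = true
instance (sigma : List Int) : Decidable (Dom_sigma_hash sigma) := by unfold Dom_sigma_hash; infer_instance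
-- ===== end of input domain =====

-- B builds the bit pattern as a '0'/'1' string and converts it once with int(s, 2), instead of A's per-hit pow(2, d)-and-add loop (alternative algorithm).

-- ===== PORT A =====
-- state (d, hash_value); hash_value += pow(2, d) when i == 2, then d += 1
def sigma_hash (sigma : List Int) : Int :=
  (sigma.foldl (fun (s : Nat × Int) i =>
      (s.1 + 1, if i = 2 then s.2 + 2 ^ s.1 else s.2)) (0, 0)).2

-- ===== PORT B =====
-- bits = ''.join('1' if i == 2 else '0' for i in sigma)
-- int(s, 2) on a nonempty string of '0'/'1' chars: standard base-2 left-to-right parse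
-- (hand-ported, exact on such strings, which is all B ever feeds it); bits[::-1] = List.reverse.
def pyIntBase2 (s : List Char) : Int :=
  s.foldl (fun h c => 2 * h + (if c = '1' then 1 else 0)) 0

def sigma_hash_alt (sigma : List Int) : Int :=
  let bits := sigma.map (fun i => if i = 2 then '1' else '0')
  if bits.isEmpty then 0 else pyIntBase2 bits.reverse

-- ===== PRECONDITION & SPEC =====
def Spec_sigma_hash (sigma : List Int) (out : Int) : Prop := out = sigma_hash_alt sigma
instance (sigma : List Int) (out : Int) : Decidable (Spec_sigma_hash sigma out) := by unfold Spec_sigma_hash; infer_instance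

-- ===== CLAIM (what is proved, stated in full; the proofs are below) =====
def Claim_equal_sigma_hash : Prop := ∀ (sigma : List Int), Dom_sigma_hash sigma → Spec_sigma_hash sigma (sigma_hash sigma)

-- ===== LEMMAS AND PROOFS =====
theorem sigma_hash_foldl_eq (l : List Int) (d : Nat) (h : Int) :
    (l.foldl (fun (s : Nat × Int) i =>
        (s.1 + 1, if i = 2 then s.2 + 2 ^ s.1 else s.2)) (d, h)).2
      = h + 2 ^ d * l.foldr (fun i h => 2 * h + (if i = 2 then 1 else 0)) 0 := by
  induction l generalizing d h with
  | nil => simp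
  | cons a l ih =>
    simp only [List.foldl, List.foldr, ih]
    split_ifs <;> ring

theorem sigma_hash_alt_foldr (sigma : List Int) :
    sigma_hash_alt sigma
      = sigma.foldr (fun i h => 2 * h + (if i = 2 then 1 else 0)) 0 := by
  simp only [sigma_hash_alt, pyIntBase2]
  cases sigma with
  | nil => simp
  | cons a l =>
    have h1 : (List.map (fun i => if i = 2 then ('1':Char) else '0') (a::l)).isEmpty = false := by
      simp
    rw [h1, if_neg (by simp : ¬ (false = true)), List.foldl_reverse, List.foldr_map]
    congr 1
    funext i h
    by_cases hi : i = 2 <;> simp [hi]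


-- ===== VERDICT (by name: the statement is the Claim_ definition above) =====
theorem sigma_hash_spec : Claim_equal_sigma_hash := by
  intro sigma _
  show _ = _
  rw [sigma_hash_alt_foldr]
  simpa using sigma_hash_foldl_eq sigma 0 0
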